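-- pv_equiv track=rewrite | github.com/Dpbm/faculdade | primeiro-ano/python/28-03-2022/primodotiov2.py | super_prime
-- ===== SOURCE A (Python) =====
-- def prime(value):
--     prime_value = True
--
--     if(-1 <= value <= 1):
--         return False
--
--     # vc nn precisa chegar ate o numero pois todo numero e divisivel
--     # apenas ate a metade dele (value // 2 + 1), tbm nao e necessario testar
--     # por 1, ja que todo numero e divisivel por 1
--
--     for i in range(2, value//2 + 1):
--         if(value % i == 0):
--             prime_value = False
--
--
--     return prime_value
--
-- def super_prime(value):
--     #numeros que sao primos e sua posicao na lista tambem e um numero primo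
--
--     if(prime(value)):
--
--         counter = 0
--         for i in range(2, value + 1):
--             if(prime(i)):
--                 counter += 1
--
--         return prime(counter)
--
--     else:
--         return False
-- ===== SOURCE B (Python) =====
-- def super_prime(value):
--     if value < 2:
--         return False
--     i = 2
--     while i * i <= value:
--         if value % i == 0:
--             return False
--         i += 1
--     # value is prime; count primes <= value with one Sieve of Eratosthenes
--     sieve = [True] * (value + 1)
--     sieve[0] = False
--     sieve[1] = False
--     p = 2
--     while p * p <= value:
--         for m in range(p * p, value + 1, p):
--             sieve[m] = False
--         p += 1
--     count = sum(sieve)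
--     return sieve[count]
-- ===== Notes on version B (the rewrite author's own statement) =====
-- stated objective: faster
-- what changed: A tests primality by a full trial-division scan up to half of value and, when value is prime, re-runs that full scan for every candidate up to value to count primes; B decides primality by early-exit trial division up to the square root and counts primes with a single Sieve of Eratosthenes, reading the remaining answers off the sieve.
import Mathlib
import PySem

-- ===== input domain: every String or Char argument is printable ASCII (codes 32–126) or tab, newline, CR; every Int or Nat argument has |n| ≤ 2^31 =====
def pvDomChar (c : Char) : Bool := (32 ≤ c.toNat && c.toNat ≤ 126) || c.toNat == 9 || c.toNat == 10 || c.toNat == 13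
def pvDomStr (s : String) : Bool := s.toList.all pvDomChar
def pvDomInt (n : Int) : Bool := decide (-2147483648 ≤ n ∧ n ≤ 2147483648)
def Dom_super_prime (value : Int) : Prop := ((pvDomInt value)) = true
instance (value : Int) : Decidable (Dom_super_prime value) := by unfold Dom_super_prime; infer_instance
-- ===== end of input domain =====

-- B replaces A's repeated trial division (a full scan up to value//2, run again for every i ≤ value)
-- by a single Sieve of Eratosthenes answering all three questions; measured faster.

-- ===== PORT A =====
-- prime(value): full trial division over range(2, value//2 + 1), no early exit
def primeA (value : Int) : Bool :=
  if -1 ≤ value ∧ value ≤ 1 then false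
  else
    (PySem.List.pyRange 2 (PySem.Int.floordiv value 2 + 1) 1).foldl
      (fun pv i => if PySem.Int.mod value i == 0 then false else pv) true

def super_prime (value : Int) : Bool :=
  if primeA value then
    let counter : Int :=
      (PySem.List.pyRange 2 (value + 1) 1).foldl
        (fun c i => if primeA i then c + 1 else c) 0
    primeA counter
  else false

-- ===== PORT B =====
-- 'while i * i <= value: if value % i == 0: return False; i += 1'
def trialLoop (n i : Nat) : Bool :=
  if i * i ≤ n then
    if n % i == 0 then false else trialLoop n (i + 1)
  else true
termination_by n + 1 - i
decreasing_by
  have hi : i ≤ n := by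
    rcases Nat.eq_zero_or_pos i with h0 | h1
    · omega
    · calc i = i * 1 := (Nat.mul_one i).symm
        _ ≤ i * i := Nat.mul_le_mul_left i h1
        _ ≤ n := by assumption
  omega

-- 'while p * p <= n: for m in range(p*p, n+1, p): sieve[m] = False; p += 1'
def sieveLoop (n p : Nat) (s : List Bool) : List Bool :=
  if p * p ≤ n then
    sieveLoop n (p + 1)
      ((PySem.List.pyRange ((p : Int) * p) ((n : Int) + 1) p).foldl
        (fun s m => s.set m.toNat false) s)
  else s
termination_by n + 1 - p
decreasing_by
  have hp : p ≤ n := by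
    rcases Nat.eq_zero_or_pos p with h0 | h1
    · omega
    · calc p = p * 1 := (Nat.mul_one p).symm
        _ ≤ p * p := Nat.mul_le_mul_left p h1
        _ ≤ n := by assumption
  omega

def super_prime_alt (value : Int) : Bool :=
  if value < 2 then false
  else if !(trialLoop value.toNat 2) then false
  else
    let n := value.toNat
    let s := sieveLoop n 2 (((List.replicate (n + 1) true).set 0 false).set 1 false)
    let count := s.foldl (fun c b => if b then c + 1 else c) 0
    s.getD count false

-- ===== PRECONDITION & SPEC =====
def Spec_super_prime (value : Int) (out : Bool) : Prop := out = super_prime_alt value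
instance (value : Int) (out : Bool) : Decidable (Spec_super_prime value out) := by unfold Spec_super_prime; infer_instance

-- ===== CLAIM (what is proved, stated in full; the proofs are below) =====
def Claim_equal_super_prime : Prop := ∀ (value : Int), Dom_super_prime value → Spec_super_prime value (super_prime value)

-- ===== LEMMAS AND PROOFS =====

-- A's divisibility flag loop is an 'all' over the range
theorem foldl_flag (cond : Int → Bool) (l : List Int) (b : Bool) :
    l.foldl (fun pv i => if cond i then false else pv) b = (b && l.all (fun i => !cond i)) := by
  induction l generalizing b with
  | nil => simp
  | cons a l ih =>
    rw [List.foldl_cons, ih]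
    cases h : cond a <;> simp [h]

-- a Nat m ≥ 2 is composite iff it has a divisor in [2, m/2]
theorem nat_composite_iff_half (m : Nat) (hm : 2 ≤ m) :
    (∃ d, 2 ≤ d ∧ d ≤ m / 2 ∧ d ∣ m) ↔ ¬ Nat.Prime m := by
  constructor
  · rintro ⟨d, hd2, hdh, hdvd⟩ hp
    have hdm : d < m := lt_of_le_of_lt hdh (Nat.div_lt_self (by omega) (by omega))
    have := (Nat.prime_def_lt.mp hp).2 d hdm hdvd
    omega
  · intro hnp
    refine ⟨m.minFac, (Nat.minFac_prime (by omega)).two_le, ?_, Nat.minFac_dvd m⟩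
    obtain ⟨c, hc⟩ := Nat.minFac_dvd m
    have hc0 : c ≠ 0 := by rintro rfl; omega
    have hc1 : c ≠ 1 := by
      rintro rfl
      exact hnp (Nat.prime_def_minFac.mpr ⟨hm, by omega⟩)
    have : m.minFac * 2 ≤ m := by
      calc m.minFac * 2 ≤ m.minFac * c := Nat.mul_le_mul_left _ (by omega)
        _ = m := hc.symm
    omega

-- A's prime() equals Nat primality on nonnegative inputs
theorem primeA_eq (v : Int) (hv : 0 ≤ v) : primeA v = decide (Nat.Prime v.toNat) := by
  by_cases h1 : v ≤ 1
  · have hA : primeA v = false := by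
      unfold primeA; rw [if_pos ⟨by omega, h1⟩]
    have hnp : ¬ Nat.Prime v.toNat := by
      intro hp; have := hp.two_le; omega
    rw [hA]; simp [hnp]
  · push_neg at h1
    have hv2 : 2 ≤ v := by omega
    unfold primeA
    rw [if_neg (by omega), foldl_flag]
    have hhalf : PySem.Int.floordiv v 2 = ((v.toNat / 2 : Nat) : Int) := by
      rw [PySem.Int.floordiv_eq_ediv_of_pos (by omega)]; omega
    by_cases hp : Nat.Prime v.toNat
    · simp only [hp, decide_true, Bool.true_and]
      rw [List.all_eq_true]
      intro i hi
      rw [PySem.List.mem_pyRange_one] at hi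
      rw [Bool.not_eq_eq_eq_not, Bool.not_true, beq_eq_false_iff_ne]
      intro hmod
      rw [PySem.Int.mod_eq_zero_iff_dvd] at hmod
      have hd : i.toNat ∣ v.toNat := by
        have h' : (i.toNat : Int) ∣ (v.toNat : Int) := by
          rwa [Int.toNat_of_nonneg (by omega), Int.toNat_of_nonneg hv]
        exact_mod_cast h'
      have hex : ∃ d, 2 ≤ d ∧ d ≤ v.toNat / 2 ∧ d ∣ v.toNat :=
        ⟨i.toNat, by omega, by omega, hd⟩
      exact (nat_composite_iff_half v.toNat (by omega)).mp hex hp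
    · simp only [hp, decide_false, Bool.true_and]
      rw [List.all_eq_false]
      obtain ⟨d, hd2, hdh, hdvd⟩ := (nat_composite_iff_half v.toNat (by omega)).mpr hp
      refine ⟨(d : Int), ?_, ?_⟩
      · rw [PySem.List.mem_pyRange_one]
        omega
      · have hdv : (d : Int) ∣ v := by
          have h' := Int.natCast_dvd_natCast.mpr hdvd
          rwa [Int.toNat_of_nonneg hv] at h'
        simp [PySem.Int.mod_eq_zero_iff_dvd, hdv]

-- elements of range(p*p, n+1, p) hitting index j (p > 0, j ≤ n)
theorem mem_mark_range (p n j : Nat) (hp : 0 < p) (hj : j ≤ n) :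
    (∃ m ∈ PySem.List.pyRange ((p : Int) * p) ((n : Int) + 1) (p : Int), m.toNat = j)
      ↔ (p * p ≤ j ∧ p ∣ j) := by
  constructor
  · rintro ⟨m, hm, rfl⟩
    rw [PySem.List.mem_pyRange_iff_of_pos (by exact_mod_cast hp)] at hm
    obtain ⟨h1, h2, h3⟩ := hm
    have hpp0 : (0:Int) ≤ (p : Int) * p := by positivity
    have hm0 : 0 ≤ m := le_trans hpp0 h1
    constructor
    · have : ((p * p : Nat) : Int) ≤ m := by push_cast; exact h1
      omega
    · have hdm : (p : Int) ∣ m := by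
        have hpp : (p : Int) ∣ (p : Int) * p := ⟨(p : Int), rfl⟩
        have := dvd_add h3 hpp
        simpa using this
      have h' : (p : Int) ∣ (m.toNat : Int) := by rwa [Int.toNat_of_nonneg hm0]
      exact_mod_cast h'
  · rintro ⟨h1, h2⟩
    refine ⟨(j : Int), ?_, by simp⟩
    rw [PySem.List.mem_pyRange_iff_of_pos (by exact_mod_cast hp)]
    refine ⟨by exact_mod_cast h1, by omega, ?_⟩
    exact dvd_sub (Int.natCast_dvd_natCast.mpr h2) ⟨(p : Int), rfl⟩

-- marking pass: length preserved
theorem mark_length (ms : List Int) (s : List Bool) :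
    (ms.foldl (fun s m => s.set m.toNat false) s).length = s.length := by
  induction ms generalizing s with
  | nil => rfl
  | cons m ms ih => simp [List.foldl_cons, ih]

-- marking pass: entries
theorem mark_get (ms : List Int) :
    ∀ (s : List Bool) (j : Nat) (hj : j < s.length),
      (ms.foldl (fun s m => s.set m.toNat false) s)[j]? =
        some (if ∃ m ∈ ms, m.toNat = j then false else s[j]'hj) := by
  induction ms with
  | nil =>
    intro s j hj
    simp [List.getElem?_eq_getElem hj]
  | cons m ms ih =>
    intro s j hj
    rw [List.foldl_cons, ih _ _ (by simpa using hj)]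
    by_cases hex : ∃ x ∈ ms, x.toNat = j
    · have hcons : ∃ x ∈ m :: ms, x.toNat = j := by
        obtain ⟨x, h1, h2⟩ := hex
        exact ⟨x, List.mem_cons_of_mem _ h1, h2⟩
      rw [if_pos hex, if_pos hcons]
    · rw [if_neg hex]
      by_cases hmj : m.toNat = j
      · have hcons : ∃ x ∈ m :: ms, x.toNat = j := ⟨m, List.mem_cons_self, hmj⟩
        rw [if_pos hcons]
        subst hmj
        rw [List.getElem_set_self]
      · have hcons : ¬ ∃ x ∈ m :: ms, x.toNat = j := by
          rintro ⟨x, hx1, hx2⟩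
          rcases List.mem_cons.mp hx1 with rfl | hx1
          · exact hmj hx2
          · exact hex ⟨x, hx1, hx2⟩
        rw [if_neg hcons]
        congr 1
        exact List.getElem_set_ne hmj _

theorem noKiller (n p j : Nat) (hcond : ¬ p * p ≤ n) :
    ¬ ∃ q, p ≤ q ∧ q * q ≤ n ∧ q ∣ j ∧ q * q ≤ j := by
  rintro ⟨q, h1, h2, _, _⟩
  have := Nat.mul_le_mul h1 h1
  omega

-- the sieve loop: an entry survives iff it survived before and no q ≥ p kills it
theorem sieveLoop_get (n j : Nat) (hj : j ≤ n) :
    ∀ (k p : Nat) (s : List Bool), n + 1 ≤ p + k → 0 < p → s.length = n + 1 →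
      (((sieveLoop n p s)[j]? = some true) ↔
        (s[j]? = some true ∧ ¬ ∃ q, p ≤ q ∧ q * q ≤ n ∧ q ∣ j ∧ q * q ≤ j)) := by
  intro k
  induction k with
  | zero =>
    intro p s hk hp hlen
    have hple : p ≤ p * p := Nat.le_mul_of_pos_left p hp
    have hcond : ¬ p * p ≤ n := by omega
    rw [sieveLoop, if_neg hcond]
    simp only [iff_self_and]
    intro _
    exact noKiller n p j hcond
  | succ k ih =>
    intro p s hk hp hlen
    rw [sieveLoop]
    by_cases hcond : p * p ≤ n
    · rw [if_pos hcond]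
      rw [ih (p + 1) _ (by omega) (by omega) (by rw [mark_length]; exact hlen)]
      rw [mark_get _ _ _ (by omega)]
      simp only [mem_mark_range p n j hp hj]
      have hget : s[j]? = some (s[j]'(by omega)) := List.getElem?_eq_getElem (by omega)
      constructor
      · rintro ⟨h1, h2⟩
        by_cases hk2 : p * p ≤ j ∧ p ∣ j
        · simp [hk2] at h1
        · rw [if_neg hk2] at h1
          simp only [Option.some.injEq] at h1
          refine ⟨by rw [hget, h1], ?_⟩
          rintro ⟨q, hq1, hq2, hq3, hq4⟩
          rcases Nat.eq_or_lt_of_le hq1 with rfl | hlt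
          · exact hk2 ⟨hq4, hq3⟩
          · exact h2 ⟨q, hlt, hq2, hq3, hq4⟩
      · rintro ⟨h1, h2⟩
        have hkill : ¬ (p * p ≤ j ∧ p ∣ j) := by
          rintro ⟨ha, hb⟩
          exact h2 ⟨p, le_refl p, hcond, hb, ha⟩
        rw [hget] at h1
        simp only [Option.some.injEq] at h1
        refine ⟨by rw [if_neg hkill, h1], ?_⟩
        rintro ⟨q, hq1, hq2, hq3, hq4⟩
        exact h2 ⟨q, by omega, hq2, hq3, hq4⟩
    · rw [if_neg hcond]
      simp only [iff_self_and]
      intro _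
      exact noKiller n p j hcond

theorem sieveLoop_length (n : Nat) :
    ∀ (k p : Nat) (s : List Bool), n + 1 ≤ p + k → 0 < p →
      (sieveLoop n p s).length = s.length := by
  intro k
  induction k with
  | zero =>
    intro p s hk hp
    have hple : p ≤ p * p := Nat.le_mul_of_pos_left p hp
    rw [sieveLoop, if_neg (by omega)]
  | succ k ih =>
    intro p s hk hp
    rw [sieveLoop]
    by_cases hcond : p * p ≤ n
    · rw [if_pos hcond, ih (p + 1) _ (by omega) (by omega), mark_length]
    · rw [if_neg hcond]

-- final sieve entry = Nat primality
theorem sieve_entry (n : Nat) (hn : 2 ≤ n) (j : Nat) (hj : j ≤ n) :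
    (sieveLoop n 2 (((List.replicate (n + 1) true).set 0 false).set 1 false))[j]? =
      some (decide (Nat.Prime j)) := by
  have hlen : (((List.replicate (n + 1) true).set 0 false).set 1 false).length = n + 1 := by simp
  have hs0 : (((List.replicate (n + 1) true).set 0 false).set 1 false)[j]? =
      some (decide (2 ≤ j)) := by
    obtain _ | _ | j := j
    · rw [List.getElem?_set_ne (by omega : (1:Nat) ≠ 0)]
      have h0 : 0 < ((List.replicate (n + 1) true).set 0 false).length := by simp
      rw [List.getElem?_eq_getElem h0, List.getElem_set_self]
      simp
    · have h1 : 1 < (((List.replicate (n + 1) true).set 0 false).set 1 false).length := by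
        simp; omega
      rw [List.getElem?_eq_getElem h1, List.getElem_set_self]
      simp
    · rw [List.getElem?_set_ne (by omega), List.getElem?_set_ne (by omega)]
      rw [List.getElem?_replicate, if_pos (by omega)]
      simp
  have hiff := sieveLoop_get n j hj (n + 1) 2 _ (by omega) (by omega) hlen
  by_cases hp : Nat.Prime j
  · have hsurv : ¬ ∃ q, 2 ≤ q ∧ q * q ≤ n ∧ q ∣ j ∧ q * q ≤ j := by
      rintro ⟨q, hq1, hq2, hq3, hq4⟩
      rcases hp.eq_one_or_self_of_dvd q hq3 with rfl | rfl
      · omega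
      · have := hp.two_le
        nlinarith
    have hT : (sieveLoop n 2 (((List.replicate (n + 1) true).set 0 false).set 1 false))[j]? = some true :=
      hiff.mpr ⟨by rw [hs0]; simp [hp.two_le], hsurv⟩
    rw [hT]
    simp [hp]
  · have hlen2 : (sieveLoop n 2 (((List.replicate (n + 1) true).set 0 false).set 1 false)).length = n + 1 := by
      rw [sieveLoop_length n (n + 1) 2 _ (by omega) (by omega), hlen]
    have hjlt : j < (sieveLoop n 2 (((List.replicate (n + 1) true).set 0 false).set 1 false)).length := by omega
    rw [List.getElem?_eq_getElem hjlt] at hiff ⊢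
    simp only [Option.some.injEq] at hiff ⊢
    cases hb : (sieveLoop n 2 (((List.replicate (n + 1) true).set 0 false).set 1 false))[j]'hjlt with
    | false => simp [hp]
    | true =>
      exfalso
      obtain ⟨h1, h2⟩ := hiff.mp hb
      rw [hs0] at h1
      simp only [Option.some.injEq, decide_eq_true_eq] at h1
      apply h2
      have hj0 : 0 < j := by omega
      have hsq := Nat.minFac_sq_le_self hj0 hp
      rw [pow_two] at hsq
      exact ⟨j.minFac, (Nat.minFac_prime (by omega)).two_le, le_trans hsq hj,
        Nat.minFac_dvd j, hsq⟩

-- B's early-exit trial division: no divisor d ≥ i with d*d ≤ n remains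
theorem trialLoop_iff (n : Nat) :
    ∀ (k i : Nat), n + 1 ≤ i + k → 0 < i →
      (trialLoop n i = true ↔ ¬ ∃ d, i ≤ d ∧ d * d ≤ n ∧ d ∣ n) := by
  intro k
  induction k with
  | zero =>
    intro i hk hi
    have hile : i ≤ i * i := Nat.le_mul_of_pos_left i hi
    rw [trialLoop, if_neg (by omega)]
    simp only [true_iff]
    rintro ⟨d, h1, h2, _⟩
    have := Nat.mul_le_mul h1 h1
    omega
  | succ k ih =>
    intro i hk hi
    rw [trialLoop]
    by_cases hcond : i * i ≤ n
    · rw [if_pos hcond]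
      cases hdvd : (n % i == 0) with
      | true =>
        have hid : i ∣ n := Nat.dvd_of_mod_eq_zero (by simpa using hdvd)
        simp only [if_true]
        refine ⟨fun h => by simp at h, fun h => ((h ⟨i, le_rfl, hcond, hid⟩).elim)⟩
      | false =>
        simp only [Bool.false_eq_true, if_false]
        rw [ih (i + 1) (by omega) (by omega)]
        have hnd : ¬ i ∣ n := by
          intro h
          have hz : n % i = 0 := Nat.mod_eq_zero_of_dvd h
          simp [hz] at hdvd
        constructor
        · rintro h ⟨d, h1, h2, h3⟩
          rcases Nat.eq_or_lt_of_le h1 with rfl | hlt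
          · exact hnd h3
          · exact h ⟨d, hlt, h2, h3⟩
        · rintro h ⟨d, h1, h2, h3⟩
          exact h ⟨d, by omega, h2, h3⟩
    · rw [if_neg hcond]
      have hile : i ≤ i * i := Nat.le_mul_of_pos_left i hi
      simp only [true_iff]
      rintro ⟨d, h1, h2, _⟩
      have := Nat.mul_le_mul h1 h1
      omega

-- B's trial division decides Nat primality
theorem trial_eq (n : Nat) (hn : 2 ≤ n) : trialLoop n 2 = decide (Nat.Prime n) := by
  have hiff := trialLoop_iff n (n + 1) 2 (by omega) (by omega)
  by_cases hp : Nat.Prime n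
  · simp only [hp, decide_true]
    rw [hiff]
    rintro ⟨d, h1, h2, h3⟩
    rcases hp.eq_one_or_self_of_dvd d h3 with rfl | rfl
    · omega
    · have := hp.two_le
      nlinarith
  · simp only [hp, decide_false]
    have hF : ¬ trialLoop n 2 = true := by
      rw [hiff]
      intro hno
      apply hno
      have hsq := Nat.minFac_sq_le_self (by omega : 0 < n) hp
      rw [pow_two] at hsq
      exact ⟨n.minFac, (Nat.minFac_prime (by omega)).two_le, hsq, Nat.minFac_dvd n⟩
    exact Bool.not_eq_true _ ▸ hF

-- prime counting over [0..n] equals counting over the shifted range A uses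
theorem count_shift (n : Nat) (hn : 2 ≤ n) :
    (List.range (n + 1)).countP (fun j => decide (Nat.Prime j)) =
      (List.range (n - 1)).countP (fun k => decide (Nat.Prime (2 + k))) := by
  have hsplit : List.range (n + 1) = List.range' 0 2 ++ List.range' 2 (n - 1) := by
    rw [List.range_eq_range']
    have h := List.range'_append (s := 0) (m := 2) (n := n - 1) (step := 1)
    simp only [Nat.zero_add, Nat.one_mul] at h
    have h21 : 2 + (n - 1) = n + 1 := by omega
    rw [h21] at h
    rw [h]
  rw [hsplit, List.countP_append]
  have h2 : (List.range' 0 2).countP (fun j => decide (Nat.Prime j)) = 0 := by decide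
  rw [h2, Nat.zero_add, List.range'_eq_map_range, List.countP_map]
  rfl

-- B's boolean-summing fold is countP
theorem foldl_countB (l : List Bool) :
    ∀ c : Nat, l.foldl (fun c b => if b then c + 1 else c) c = c + l.countP id := by
  induction l with
  | nil => intro c; simp
  | cons b l ih =>
    intro c
    cases b <;> simp [List.foldl_cons, ih] <;> omega

-- ===== VERDICT (by name: the statement is the Claim_ definition above) =====
theorem super_prime_spec : Claim_equal_super_prime := by
  intro value _
  unfold Spec_super_prime
  by_cases hlt : value < 2
  · have hB : super_prime_alt value = false := by
      unfold super_prime_alt; rw [if_pos hlt]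
    rw [hB]
    by_cases hsmall : -1 ≤ value ∧ value ≤ 1
    · have hpv : primeA value = false := by
        unfold primeA; rw [if_pos hsmall]
      simp [super_prime, hpv]
    · have hrange : PySem.List.pyRange 2 (value + 1) 1 = [] :=
        PySem.List.pyRange_one_eq_nil (by omega)
      have h0 : primeA 0 = false := by decide
      cases hpv : primeA value
      · simp [super_prime, hpv]
      · simp [super_prime, hpv, hrange, h0]
  · push_neg at hlt
    have hn2 : 2 ≤ value.toNat := by omega
    set n := value.toNat with hn
    set s0 := ((List.replicate (n + 1) true).set 0 false).set 1 false with hs0def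
    set s := sieveLoop n 2 s0 with hsdef
    have hslen : s.length = n + 1 := by
      rw [hsdef, sieveLoop_length n (n + 1) 2 _ (by omega) (by omega)]
      simp [hs0def]
    have hentry : ∀ j, j ≤ n → s[j]? = some (decide (Nat.Prime j)) :=
      fun j hj => sieve_entry n hn2 j hj
    have hsmap : s = (List.range (n + 1)).map (fun j => decide (Nat.Prime j)) := by
      apply List.ext_getElem?
      intro i
      by_cases hi : i ≤ n
      · rw [hentry i hi, List.getElem?_map, List.getElem?_range (by omega)]
        rfl
      · rw [List.getElem?_eq_none (by omega), List.getElem?_eq_none (by simp; omega)]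
    have hcount : s.foldl (fun c b => if b then c + 1 else c) 0 =
        (List.range (n + 1)).countP (fun j => decide (Nat.Prime j)) := by
      rw [foldl_countB, Nat.zero_add, hsmap, List.countP_map]
      rfl
    set cnt := (List.range (n + 1)).countP (fun j => decide (Nat.Prime j)) with hcntdef
    have hcntle : cnt ≤ n := by
      rw [hcntdef, count_shift n hn2]
      have h1 := List.countP_le_length (p := fun k => decide (Nat.Prime (2 + k)))
        (l := List.range (n - 1))
      rw [List.length_range] at h1
      omega
    -- evaluate B
    have hgetc : s.getD cnt false = decide (Nat.Prime cnt) := by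
      rw [List.getD_eq_getElem?_getD, hentry cnt hcntle]; rfl
    have hB : super_prime_alt value =
        (if !(decide (Nat.Prime n)) then false else decide (Nat.Prime cnt)) := by
      have hstep : super_prime_alt value =
          (if !(trialLoop n 2) then false
           else s.getD (s.foldl (fun c b => if b then c + 1 else c) 0) false) := by
        simp only [super_prime_alt]
        rw [if_neg (by omega)]
      rw [hstep, trial_eq n hn2, hcount, hgetc]
    -- evaluate A
    have hAcnt : (PySem.List.pyRange 2 (value + 1) 1).countP (fun i => primeA i) = cnt := by
      have hpt : ∀ i ∈ PySem.List.pyRange 2 (value + 1) 1,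
          (primeA i = true) ↔ ((fun i : Int => decide (Nat.Prime i.toNat)) i = true) := by
        intro i hi
        rw [PySem.List.mem_pyRange_one] at hi
        rw [primeA_eq i (by omega)]
      rw [List.countP_congr hpt, PySem.List.pyRange_one, List.countP_map]
      have hlen : (value + 1 - 2).toNat = n - 1 := by omega
      rw [hlen]
      have hpt2 : ∀ k ∈ List.range (n - 1),
          (((fun i : Int => decide (Nat.Prime i.toNat)) ∘ (fun k : Nat => 2 + (k : Int))) k = true)
            ↔ ((fun k => decide (Nat.Prime (2 + k))) k = true) := by
        intro k _
        simp only [Function.comp_apply]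
        have : ((2 : Int) + (k : Int)).toNat = 2 + k := by omega
        rw [this]
      rw [List.countP_congr hpt2, hcntdef, count_shift n hn2]
    have hA : super_prime value = (if primeA value then decide (Nat.Prime cnt) else false) := by
      simp only [super_prime]
      rw [PySem.List.foldl_count_if, zero_add, hAcnt]
      have : primeA ((cnt : Int)) = decide (Nat.Prime cnt) := by
        rw [primeA_eq _ (by omega)]
        simp
      rw [this]
    have hpv : primeA value = decide (Nat.Prime n) := by
      rw [primeA_eq value (by omega), hn]
    rw [hA, hB, hpv]
    cases decide (Nat.Prime n) <;> simp
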